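-- pv_equiv track=rewrite | github.com/rondelli/myo-tp | 6_sexta_parte/prueba.py | isValidSubset
-- ===== SOURCE A (Python) =====
-- from collections import Counter
--
-- def isValidSubset(subset, numbers, threshold):
--     subsetSum = sum(subset)
--     if subsetSum > threshold:
--         return False
--
--     subsetCount = Counter(subset)
--     numbersCount = Counter(numbers)
--
--     for num, count in subsetCount.items():
--         if count > numbersCount[num]:  # Exceeds original frequency
--             return False
--
--     return True
-- ===== SOURCE B (Python) =====
-- def isValidSubset(subset, numbers, threshold):
--     if sum(subset) > threshold:
--         return False
--     available = list(numbers)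
--     for x in subset:
--         if x in available:
--             available.remove(x)
--         else:
--             return False
--     return True
-- ===== Notes on version B (the rewrite author's own statement) =====
-- stated objective: simpler
-- what changed: Replaces the two Counters and the frequency-comparison loop by a single pass over subset that greedily consumes elements from a shrinking copy of numbers.
import Mathlib
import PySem

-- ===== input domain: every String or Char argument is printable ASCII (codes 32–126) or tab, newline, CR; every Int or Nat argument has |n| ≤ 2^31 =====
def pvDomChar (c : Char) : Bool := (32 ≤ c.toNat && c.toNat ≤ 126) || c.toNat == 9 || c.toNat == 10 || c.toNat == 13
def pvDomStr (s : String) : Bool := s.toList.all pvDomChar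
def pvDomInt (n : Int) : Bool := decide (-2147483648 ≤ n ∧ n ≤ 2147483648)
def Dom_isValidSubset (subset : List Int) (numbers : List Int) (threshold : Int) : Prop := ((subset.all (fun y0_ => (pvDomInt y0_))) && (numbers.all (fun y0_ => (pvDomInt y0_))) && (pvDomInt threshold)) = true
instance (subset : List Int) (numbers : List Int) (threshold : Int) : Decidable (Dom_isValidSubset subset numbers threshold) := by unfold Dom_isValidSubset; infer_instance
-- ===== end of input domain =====

-- B replaces the two Counters by a single greedy pass consuming a shrinking copy of numbers (objective: simpler).


-- ===== PORT A =====
-- loop over Counter(subset).items() comparing each count against numbers' count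
def pvLoopA (items : List (Int × Int)) (numbersCount : PySem.Dict Int Int) : Bool :=
  match items with
  | [] => true
  | (num, count) :: rest =>
      if count > numbersCount.getD num 0 then false
      else pvLoopA rest numbersCount

def isValidSubset (subset : List Int) (numbers : List Int) (threshold : Int) : Bool :=
  let subsetSum := subset.sum
  if subsetSum > threshold then false
  else
    let subsetCount := PySem.Dict.counter subset
    let numbersCount := PySem.Dict.counter numbers
    pvLoopA subsetCount.items numbersCount

-- ===== PORT B =====
-- B: one pass over subset consuming elements from a shrinking copy of numbers
def pvConsume (subset : List Int) (available : List Int) : Bool :=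
  match subset with
  | [] => true
  | x :: rest =>
      if available.contains x then pvConsume rest (available.erase x)
      else false

def isValidSubset_alt (subset : List Int) (numbers : List Int) (threshold : Int) : Bool :=
  if subset.sum > threshold then false
  else pvConsume subset numbers

-- ===== PRECONDITION & SPEC =====
def Spec_isValidSubset (subset : List Int) (numbers : List Int) (threshold : Int) (out : Bool) : Prop := out = isValidSubset_alt subset numbers threshold
instance (subset : List Int) (numbers : List Int) (threshold : Int) (out : Bool) : Decidable (Spec_isValidSubset subset numbers threshold out) := by unfold Spec_isValidSubset; infer_instance

-- ===== CLAIM (what is proved, stated in full; the proofs are below) =====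
def Claim_equal_isValidSubset : Prop := ∀ (subset : List Int) (numbers : List Int) (threshold : Int), Dom_isValidSubset subset numbers threshold → Spec_isValidSubset subset numbers threshold (isValidSubset subset numbers threshold)

-- ===== LEMMAS AND PROOFS =====

-- counting step: consuming one occurrence of x from the pool matches the head of subset
theorem pvCounts_step (x : Int) (rest available : List Int) (hx : x ∈ available) :
    (∀ y : Int, rest.count y ≤ (available.erase x).count y) ↔
      (∀ y : Int, (x :: rest).count y ≤ available.count y) := by
  have hpos : 1 ≤ available.count x := List.one_le_count_iff.mpr hx
  constructor
  · intro h y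
    have hy := h y
    by_cases hxy : y = x
    · subst hxy
      rw [List.count_erase_self] at hy
      rw [List.count_cons_self]
      omega
    · rw [List.count_erase_of_ne hxy] at hy
      rw [List.count_cons_of_ne (Ne.symm hxy)]
      exact hy
  · intro h y
    have hy := h y
    by_cases hxy : y = x
    · subst hxy
      rw [List.count_cons_self] at hy
      rw [List.count_erase_self]
      omega
    · rw [List.count_cons_of_ne (Ne.symm hxy)] at hy
      rw [List.count_erase_of_ne hxy]
      exact hy

-- B's greedy consumption succeeds iff every multiplicity in subset is available in the pool
theorem pvConsume_eq_true_iff (subset available : List Int) :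
    pvConsume subset available = true ↔
      ∀ y : Int, subset.count y ≤ available.count y := by
  induction subset generalizing available with
  | nil => simp [pvConsume]
  | cons x rest ih =>
    by_cases hx : x ∈ available
    · have hc : available.contains x = true := by simpa using hx
      rw [pvConsume, hc, if_pos rfl, ih]
      exact pvCounts_step x rest available hx
    · have hc : available.contains x = false := by simpa using hx
      have h0 : available.count x = 0 := List.count_eq_zero.mpr hx
      have hfalse : pvConsume (x :: rest) available = false := by
        rw [pvConsume, hc]; simp
      rw [hfalse]
      simp only [Bool.false_eq_true, false_iff]
      intro h
      have hx' := h x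
      rw [List.count_cons_self, h0] at hx'
      omega

-- A's early-exit loop over an item list is an 'all' over that list
theorem pvLoopA_eq_all (items : List (Int × Int)) (d : PySem.Dict Int Int) :
    pvLoopA items d = items.all (fun p => decide (p.2 ≤ d.getD p.1 0)) := by
  induction items with
  | nil => rfl
  | cons p rest ih =>
    obtain ⟨num, count⟩ := p
    simp only [pvLoopA, List.all_cons, ih]
    by_cases h : count > d.getD num 0
    · simp [h, not_le.mpr h]
    · simp [h, not_lt.mp h]

-- ===== VERDICT (by name: the statement is the Claim_ definition above) =====
theorem isValidSubset_spec : Claim_equal_isValidSubset := by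
  intro subset numbers threshold _
  unfold Spec_isValidSubset isValidSubset isValidSubset_alt
  by_cases hs : subset.sum > threshold
  · simp [hs]
  · simp only [hs, if_false]
    rw [pvLoopA_eq_all, PySem.Dict.items_counter]
    have key : (∀ p ∈ (PySem.Set.ofList subset).map
          (fun k => (k, (subset.count k : Int))),
          decide (p.2 ≤ (PySem.Dict.counter numbers).getD p.1 0) = true) ↔
        (∀ y : Int, subset.count y ≤ numbers.count y) := by
      constructor
      · intro h y
        by_cases hy : y ∈ subset
        · have hmem : (y, (subset.count y : Int)) ∈
              (PySem.Set.ofList subset).map (fun k => (k, (subset.count k : Int))) :=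
            List.mem_map.mpr ⟨y, (PySem.Set.mem_ofList _ _).mpr hy, rfl⟩
          have := h _ hmem
          simp [PySem.Dict.getD_counter] at this
          exact_mod_cast this
        · simp [List.count_eq_zero.mpr hy]
      · intro h p hp
        obtain ⟨k, _, rfl⟩ := List.mem_map.mp hp
        simp [PySem.Dict.getD_counter]
        exact_mod_cast h k
    rw [Bool.eq_iff_iff, List.all_eq_true, pvConsume_eq_true_iff]
    exact key
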